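-- pv_equiv track=rewrite | github.com/meurig/AoC2023 | day11/day11part1.py | sum_of_shortest_paths
-- ===== SOURCE A (Python) =====
-- def expand_empty_space(rows) -> list[str]:
--     empty_rows = [True] * len(rows)
--     empty_columns = [True] * len(rows[0])
--     for i, row in enumerate(rows):
--         for j, char in enumerate(row):
--             if char != '.':
--                 empty_rows[i] = False
--                 empty_columns[j] = False
--
--     expanded_columns = []
--     for i, row in enumerate(rows):
--         new_column = ''
--         for j, char in enumerate(row):
--             new_column += '..' if empty_columns[j] else char
--         expanded_columns.append(new_column)
--
--     new_row = ''.join(['.'] * len(expanded_columns[0]))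
--     expanded_rows = []
--     for i, row in enumerate(expanded_columns):
--         if empty_rows[i]:
--             str(expanded_rows.append(new_row))
--             str(expanded_rows.append(new_row))
--         else:
--             str(expanded_rows.append(row))
--
--     return expanded_rows
--
-- def find_galaxies(rows: list[str]) -> list[(int, int)]:
--     galaxies = []
--     for i, row in enumerate(rows):
--         for j, char in enumerate(row):
--             if char == '#':
--                 galaxies.append((i, j))
--     return galaxies
--
-- def get_shortest_path(a: (int, int), b: (int, int)) -> int:
--     x1, y1 = a
--     x2, y2 = b
--     return abs(x2 - x1) + abs(y2 - y1)
--
-- def sum_of_shortest_paths(rows: list[str]) -> int: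
--     rows = expand_empty_space(rows)
--     galaxies = find_galaxies(rows)
--     total = 0
--     visited = set([])
--     for x in galaxies:
--         for y in galaxies:
--             if x == y or (y, x) in visited:
--                 continue
--             visited.add((x, y))
--             total += get_shortest_path(x, y)
--     return total
-- ===== SOURCE B (Python) =====
-- def prefix_offsets(nonempty):
--     off, n = [], 0
--     for b in nonempty:
--         off.append(n)
--         if not b:
--             n += 1
--     return off
--
-- def spread(coords):
--     total = prefix = 0
--     for k, c in enumerate(coords):
--         total += k * c - prefix
--         prefix += c
--     return total
--
-- def sum_of_shortest_paths(rows):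
--     width = len(rows[0])
--     row_nonempty = [False] * len(rows)
--     col_nonempty = [False] * width
--     for i, row in enumerate(rows):
--         for j, char in enumerate(row):
--             if char != '.':
--                 row_nonempty[i] = True
--                 col_nonempty[j] = True
--     row_off = prefix_offsets(row_nonempty)
--     col_off = prefix_offsets(col_nonempty)
--     xs, ys = [], []
--     for i, row in enumerate(rows):
--         for j, char in enumerate(row):
--             if char == '#':
--                 xs.append(i + row_off[i])
--                 ys.append(j + col_off[j])
--     return spread(sorted(xs)) + spread(sorted(ys))
-- ===== Notes on version B (the rewrite author's own statement) =====
-- stated objective: faster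
-- what changed: B never builds the expanded grid and never enumerates galaxy pairs: it computes each galaxy's expanded coordinate directly from prefix counts of empty rows/columns, then sums all pairwise Manhattan distances per axis with the sorted-coordinates prefix-sum identity, replacing A's O(G^2) pair loop with visited-set bookkeeping by O(G log G) sorting.
import Mathlib
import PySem

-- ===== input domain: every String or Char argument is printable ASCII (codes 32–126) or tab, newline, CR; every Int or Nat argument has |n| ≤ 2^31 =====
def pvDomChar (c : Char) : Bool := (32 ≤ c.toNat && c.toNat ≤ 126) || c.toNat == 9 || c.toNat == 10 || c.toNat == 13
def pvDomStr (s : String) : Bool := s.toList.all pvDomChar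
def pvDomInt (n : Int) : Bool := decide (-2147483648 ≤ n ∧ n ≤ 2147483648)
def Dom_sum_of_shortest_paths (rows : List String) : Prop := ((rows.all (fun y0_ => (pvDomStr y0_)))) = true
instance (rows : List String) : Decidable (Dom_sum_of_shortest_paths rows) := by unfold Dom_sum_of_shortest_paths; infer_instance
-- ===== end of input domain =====

-- B avoids building the expanded grid and the O(G^2) pair loop: it computes expanded coordinates
-- from prefix counts of empty rows/columns and sums pairwise distances per axis via sorting + prefix sums.

-- ===== PORT A =====
def expandEmptySpace (rows : List (List Char)) : List (List Char) :=
  let st0 : List Bool × List Bool :=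
    (List.replicate rows.length true, List.replicate (PySem.List.pyGetD rows 0 []).length true)
  let st := (PySem.List.enumerate rows).foldl (fun st pr =>
      (PySem.List.enumerate pr.2).foldl (fun st qr =>
        if qr.2 ≠ '.' then (PySem.List.pySetD st.1 pr.1 false, PySem.List.pySetD st.2 qr.1 false)
        else st) st) st0
  let emptyRows := st.1
  let emptyColumns := st.2
  let expandedColumns := (PySem.List.enumerate rows).foldl (fun acc pr =>
      acc ++ [(PySem.List.enumerate pr.2).foldl (fun nc qr =>
        nc ++ (if PySem.List.pyGetD emptyColumns qr.1 true then ['.', '.'] else [qr.2])) []]) []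
  let newRow := List.replicate (PySem.List.pyGetD expandedColumns 0 []).length '.'
  (PySem.List.enumerate expandedColumns).foldl (fun acc pr =>
      if PySem.List.pyGetD emptyRows pr.1 true then (acc ++ [newRow]) ++ [newRow]
      else acc ++ [pr.2]) []

def findGalaxies (rows : List (List Char)) : List (Int × Int) :=
  (PySem.List.enumerate rows).foldl (fun acc pr =>
    (PySem.List.enumerate pr.2).foldl (fun acc qr =>
      if qr.2 = '#' then acc ++ [(pr.1, qr.1)] else acc) acc) []

def getShortestPath (a : Int × Int) (b : Int × Int) : Int :=
  |b.1 - a.1| + |b.2 - a.2|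

def sum_of_shortest_paths (rows : List String) : Int :=
  let rows2 := expandEmptySpace (rows.map String.toList)
  let galaxies := findGalaxies rows2
  (galaxies.foldl (fun (st : Int × PySem.Set ((Int × Int) × (Int × Int))) x =>
      galaxies.foldl (fun st y =>
        if x == y || PySem.Set.contains st.2 (y, x) then st
        else (st.1 + getShortestPath x y, PySem.Set.add st.2 (x, y))) st)
    (0, PySem.Set.empty)).1

-- ===== PORT B =====
def prefixOffsets (nonempty : List Bool) : List Int :=
  (nonempty.foldl (fun (st : List Int × Int) b =>
    (st.1 ++ [st.2], if !b then st.2 + 1 else st.2)) (([] : List Int), (0 : Int))).1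

def spread (coords : List Int) : Int :=
  ((PySem.List.enumerate coords).foldl (fun (st : Int × Int) p =>
    (st.1 + p.1 * p.2 - st.2, st.2 + p.2)) ((0 : Int), (0 : Int))).1

def sum_of_shortest_paths_alt (rows : List String) : Int :=
  let rs := rows.map String.toList
  let width := (PySem.List.pyGetD rs 0 []).length
  let st0 : List Bool × List Bool := (List.replicate rs.length false, List.replicate width false)
  let ne := (PySem.List.enumerate rs).foldl (fun st pr =>
      (PySem.List.enumerate pr.2).foldl (fun st qr =>
        if qr.2 ≠ '.' then (PySem.List.pySetD st.1 pr.1 true, PySem.List.pySetD st.2 qr.1 true)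
        else st) st) st0
  let rowOff := prefixOffsets ne.1
  let colOff := prefixOffsets ne.2
  let xy := (PySem.List.enumerate rs).foldl (fun (st : List Int × List Int) pr =>
      (PySem.List.enumerate pr.2).foldl (fun st qr =>
        if qr.2 = '#' then
          (st.1 ++ [pr.1 + PySem.List.pyGetD rowOff pr.1 0],
           st.2 ++ [qr.1 + PySem.List.pyGetD colOff qr.1 0])
        else st) st) (([] : List Int), ([] : List Int))
  spread (PySem.List.sorted xy.1 (fun x => x) false) + spread (PySem.List.sorted xy.2 (fun x => x) false)

-- ===== PRECONDITION & SPEC =====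
-- Pre_ excludes exactly the inputs where A raises: the empty list (rows[0] IndexError) and
-- inputs where some row is longer than the first row (empty_columns[j] IndexError).
def Pre_sum_of_shortest_paths (rows : List String) : Prop :=
  rows ≠ [] ∧ ∀ r ∈ rows, r.toList.length ≤ ((rows.headD "").toList.length)
instance (rows : List String) : Decidable (Pre_sum_of_shortest_paths rows) := by
  unfold Pre_sum_of_shortest_paths; infer_instance

def pvWitness_sum_of_shortest_paths : List String := [".#.", "#..", "..#"]

def Spec_sum_of_shortest_paths (rows : List String) (out : Int) : Prop := out = sum_of_shortest_paths_alt rows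
instance (rows : List String) (out : Int) : Decidable (Spec_sum_of_shortest_paths rows out) := by
  unfold Spec_sum_of_shortest_paths; infer_instance

-- ===== CLAIM (what is proved, stated in full; the proofs are below) =====
def Claim_equal_sum_of_shortest_paths : Prop := ∀ (rows : List String), Dom_sum_of_shortest_paths rows → Pre_sum_of_shortest_paths rows → Spec_sum_of_shortest_paths rows (sum_of_shortest_paths rows)

-- ===== LEMMAS AND PROOFS =====

-- generic loop-shape helpers
lemma foldl_flatMap_fold {α β γ : Type} (l : List α) (g : α → List β) (f : γ → β → γ) (init : γ) :
    l.foldl (fun acc x => (g x).foldl f acc) init = (l.flatMap g).foldl f init := by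
  induction l generalizing init with
  | nil => simp
  | cons a l ih => simp [List.flatMap_cons, List.foldl_append, ih]

def rowNE (r : List Char) : Bool := r.any (fun c => c != '.')
def colNE (rs : List (List Char)) (j : Nat) : Bool := rs.any (fun r => r.getD j '.' != '.')

def markFold (rs : List (List Char)) (v : Bool) (bs0 cs0 : List Bool) : List Bool × List Bool :=
  (PySem.List.enumerate rs).foldl (fun st pr =>
      (PySem.List.enumerate pr.2).foldl (fun st qr =>
        if qr.2 ≠ '.' then (PySem.List.pySetD st.1 pr.1 v, PySem.List.pySetD st.2 qr.1 v)
        else st) st) (bs0, cs0)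

def events (rs : List (List Char)) : List (Int × Int × Char) :=
  (PySem.List.enumerate rs).flatMap (fun pr => (PySem.List.enumerate pr.2).map (fun qr => (pr.1, qr)))

lemma markFold_eq (rs : List (List Char)) (v : Bool) (bs0 cs0 : List Bool) :
    markFold rs v bs0 cs0 =
      ((events rs).foldl (fun bs e => if e.2.2 ≠ '.' then PySem.List.pySetD bs e.1 v else bs) bs0,
       (events rs).foldl (fun bs e => if e.2.2 ≠ '.' then PySem.List.pySetD bs e.2.1 v else bs) cs0) := by
  unfold markFold events
  have hstep : (fun (st : List Bool × List Bool) (pr : Int × List Char) =>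
      (PySem.List.enumerate pr.2).foldl (fun st qr =>
        if qr.2 ≠ '.' then (PySem.List.pySetD st.1 pr.1 v, PySem.List.pySetD st.2 qr.1 v)
        else st) st)
      = (fun (st : List Bool × List Bool) (pr : Int × List Char) =>
        ((PySem.List.enumerate pr.2).foldl
            (fun bs (qr : Int × Char) => if qr.2 ≠ '.' then PySem.List.pySetD bs pr.1 v else bs) st.1,
         (PySem.List.enumerate pr.2).foldl
            (fun bs (qr : Int × Char) => if qr.2 ≠ '.' then PySem.List.pySetD bs qr.1 v else bs) st.2)) := by
    funext st pr
    obtain ⟨b, c⟩ := st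
    have h2 : (fun (st : List Bool × List Bool) (qr : Int × Char) =>
        if qr.2 ≠ '.' then (PySem.List.pySetD st.1 pr.1 v, PySem.List.pySetD st.2 qr.1 v) else st)
        = (fun (st : List Bool × List Bool) (qr : Int × Char) =>
          (if qr.2 ≠ '.' then PySem.List.pySetD st.1 pr.1 v else st.1,
           if qr.2 ≠ '.' then PySem.List.pySetD st.2 qr.1 v else st.2)) := by
      funext st qr
      by_cases h : qr.2 = '.' <;> simp [h]
    rw [h2]
    exact PySem.List.foldl_prod_mk
      (fun bs (qr : Int × Char) => if qr.2 ≠ '.' then PySem.List.pySetD bs pr.1 v else bs)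
      (fun bs (qr : Int × Char) => if qr.2 ≠ '.' then PySem.List.pySetD bs qr.1 v else bs)
      (PySem.List.enumerate pr.2) b c
  rw [hstep]
  rw [PySem.List.foldl_prod_mk
      (fun bs (pr : Int × List Char) => (PySem.List.enumerate pr.2).foldl
          (fun bs (qr : Int × Char) => if qr.2 ≠ '.' then PySem.List.pySetD bs pr.1 v else bs) bs)
      (fun bs (pr : Int × List Char) => (PySem.List.enumerate pr.2).foldl
          (fun bs (qr : Int × Char) => if qr.2 ≠ '.' then PySem.List.pySetD bs qr.1 v else bs) bs)
      (PySem.List.enumerate rs) bs0 cs0]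
  refine Prod.ext ?_ ?_ <;>
  · dsimp only
    rw [← foldl_flatMap_fold]
    apply PySem.List.foldl_congr_mem
    intro acc pr _
    rw [List.foldl_map]

lemma mem_events {rs : List (List Char)} {e : Int × Int × Char} (he : e ∈ events rs) :
    0 ≤ e.1 ∧ 0 ≤ e.2.1 := by
  simp only [events, List.mem_flatMap, List.mem_map] at he
  obtain ⟨pr, hpr, qr, hqr, rfl⟩ := he
  rw [PySem.List.mem_enumerate_iff] at hpr hqr
  obtain ⟨k, hk, rfl⟩ := hpr
  obtain ⟨m, hm, rfl⟩ := hqr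
  constructor <;> simp

lemma any_events_row (rs : List (List Char)) (i : Nat) (hi : i < rs.length) :
    ((events rs).any (fun e => (e.2.2 != '.') && e.1 == (i : Int))) = rowNE (rs.getD i []) := by
  rw [List.getD_eq_getElem rs [] hi, Bool.eq_iff_iff]
  simp only [events, rowNE, List.any_eq_true, List.mem_flatMap, List.mem_map,
    PySem.List.mem_enumerate_iff]
  constructor
  · rintro ⟨e, ⟨pr, ⟨k, hk, rfl⟩, qr, ⟨m, hm, rfl⟩, rfl⟩, h⟩
    simp only [Bool.and_eq_true, beq_iff_eq, bne_iff_ne] at h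
    obtain ⟨hne, hki⟩ := h
    have : k = i := by omega
    subst this
    exact ⟨rs[k][m], List.getElem_mem hm, by simpa using hne⟩
  · rintro ⟨c, hc, hne⟩
    obtain ⟨m, hm, rfl⟩ := List.mem_iff_getElem.mp hc
    refine ⟨((i : Int), ((m : Int), rs[i][m])), ⟨((i:Int), rs[i]), ⟨i, hi, by simp⟩,
      ((m:Int), rs[i][m]), ⟨m, hm, by simp⟩, rfl⟩, by simpa using hne⟩

lemma any_events_col (rs : List (List Char)) (j : Nat) :
    ((events rs).any (fun e => (e.2.2 != '.') && e.2.1 == (j : Int))) = colNE rs j := by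
  rw [Bool.eq_iff_iff]
  simp only [events, colNE, List.any_eq_true, List.mem_flatMap, List.mem_map,
    PySem.List.mem_enumerate_iff]
  constructor
  · rintro ⟨e, ⟨pr, ⟨k, hk, rfl⟩, qr, ⟨m, hm, rfl⟩, rfl⟩, h⟩
    simp only [Bool.and_eq_true, beq_iff_eq, bne_iff_ne] at h
    obtain ⟨hne, hmj⟩ := h
    have : m = j := by omega
    subst this
    refine ⟨rs[k], List.getElem_mem hk, ?_⟩
    rw [List.getD_eq_getElem rs[k] '.' hm]
    simpa using hne
  · rintro ⟨r, hr, hne⟩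
    obtain ⟨k, hk, rfl⟩ := List.mem_iff_getElem.mp hr
    by_cases hj : j < rs[k].length
    · rw [List.getD_eq_getElem rs[k] '.' hj] at hne
      refine ⟨((k : Int), ((j : Int), rs[k][j])), ⟨((k:Int), rs[k]), ⟨k, hk, by simp⟩,
        ((j:Int), rs[k][j]), ⟨j, hj, by simp⟩, rfl⟩, by simpa using hne⟩
    · rw [List.getD_eq_default rs[k] '.' (by omega)] at hne
      simp at hne

def roN (rs : List (List Char)) (i : Nat) : Int := ((List.range i).countP (fun t => !rowNE (rs.getD t [])) : Int)
def coN (rs : List (List Char)) (j : Nat) : Int := ((List.range j).countP (fun t => !colNE rs t) : Int)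
def segC (rs : List (List Char)) (q : Int × Char) : List Char :=
  if colNE rs q.1.toNat then [q.2] else ['.', '.']
def rowSeg (nr : List Char) (rs : List (List Char)) (pr : Int × List Char) : List (List Char) :=
  if rowNE pr.2 then [(PySem.List.enumerate pr.2).flatMap (segC rs)] else [nr, nr]
def gSpec (rs : List (List Char)) : List (Int × Int) :=
  (PySem.List.enumerate rs).flatMap (fun pr =>
    ((PySem.List.enumerate pr.2).filter (fun q => q.2 == '#')).map
      (fun q => (pr.1 + roN rs pr.1.toNat, q.1 + coN rs q.1.toNat)))

lemma coN_succ (rs : List (List Char)) (s : Nat) :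
    coN rs (s + 1) = coN rs s + (if colNE rs s then 0 else 1) := by
  unfold coN
  rw [List.range_succ, List.countP_append]
  by_cases h : colNE rs s <;> simp [h]

lemma roN_succ (rs : List (List Char)) (i : Nat) :
    roN rs (i + 1) = roN rs i + (if rowNE (rs.getD i []) then 0 else 1) := by
  unfold roN
  rw [List.range_succ, List.countP_append]
  simp only [List.getD]
  by_cases h : rowNE (rs[i]?.getD []) = true <;> simp [h]

lemma filter_hash_nil (r : List Char) (k : Int) (h : ∀ c ∈ r, c = '.') :
    (PySem.List.enumerate r k).filter (fun q => q.2 == '#') = [] := by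
  rw [List.filter_eq_nil_iff]
  intro q hq
  rw [PySem.List.mem_enumerate_iff] at hq
  obtain ⟨m, hm, rfl⟩ := hq
  have := h r[m] (List.getElem_mem hm)
  simp [this]

lemma hash_expRow (rs : List (List Char)) (r : List Char) (s : Nat) (k : Int)
    (hsub : ∀ p ∈ PySem.List.enumerate r (s : Int), p.2 = '#' → colNE rs p.1.toNat = true)
    (hk : k = s + coN rs s) :
    ((PySem.List.enumerate ((PySem.List.enumerate r (s : Int)).flatMap (segC rs)) k).filter
        (fun q => q.2 == '#')).map (fun q => q.1)
      = ((PySem.List.enumerate r (s : Int)).filter (fun q => q.2 == '#')).map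
          (fun q => q.1 + coN rs q.1.toNat) := by
  induction r generalizing s k with
  | nil => simp
  | cons c r ih =>
    rw [PySem.List.enumerate_cons, List.flatMap_cons, PySem.List.enumerate_append,
      List.filter_append, List.map_append]
    have hcast : (s : Int) + 1 = ((s + 1 : Nat) : Int) := by push_cast; ring
    by_cases h : colNE rs s
    · have hseg : segC rs ((s : Int), c) = [c] := by simp [segC, h]
      rw [hseg]
      have htail := ih (s + 1) (k + 1)
        (by intro p hp hp2; exact hsub p (by rw [PySem.List.enumerate_cons]; right; rwa [hcast]) hp2)
        (by rw [hk, coN_succ, if_pos h]; push_cast; ring)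
      rw [hcast]
      by_cases hc : c = '#'
      · simp only [PySem.List.enumerate_cons, PySem.List.enumerate_nil, List.filter_cons, hc,
          List.length_cons, List.length_nil]
        simp only [show ((('#' : Char) == '#')) = true from by decide, if_true]
        simp only [List.map_cons]
        rw [show k + (0 + 1 : Nat) = k + 1 from by push_cast; ring, htail, hk]
        simp [show (s:Int).toNat = s from by omega]
      · have hcb : ((c == '#')) = false := by simpa using hc
        simp only [PySem.List.enumerate_cons, PySem.List.enumerate_nil, List.filter_cons, hcb,
          List.length_cons, List.length_nil]
        simp only [Bool.false_eq_true, if_false, List.map_nil, List.nil_append]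
        rw [show k + (0 + 1 : Nat) = k + 1 from by push_cast; ring, htail]
        simp
    · have hc : c ≠ '#' := by
        intro hc
        have h2 := hsub ((s : Int), c) (by simp [PySem.List.enumerate_cons]) hc
        rw [show (((s : Int), c)).1.toNat = s from by simp] at h2
        exact absurd h2 h
      have hseg : segC rs ((s : Int), c) = ['.', '.'] := by simp [segC, h]
      rw [hseg]
      have htail := ih (s + 1) (k + 2)
        (by intro p hp hp2; exact hsub p (by rw [PySem.List.enumerate_cons]; right; rwa [hcast]) hp2)
        (by rw [hk, coN_succ, if_neg h]; push_cast; ring)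
      rw [hcast]
      have h1 : ((c == '#')) = false := by simpa using hc
      simp only [PySem.List.enumerate_cons, PySem.List.enumerate_nil, List.filter_cons, h1,
        List.length_cons, List.length_nil,
        show ((('.' : Char) == '#')) = false from by decide]
      simp only [Bool.false_eq_true, if_false, List.map_nil, List.nil_append]
      rw [show k + (0 + 1 + 1 : Nat) = k + 2 from by push_cast; ring, htail]
      simp

lemma rowNE_false {r : List Char} (h : rowNE r = false) : ∀ c ∈ r, c = '.' := by
  intro c hc
  unfold rowNE at h
  rw [List.any_eq_false] at h
  simpa using h c hc

lemma gal_rows (rs : List (List Char)) (nr : List Char) (hnr : ∀ c ∈ nr, c = '.') :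
    ∀ (l : List (List Char)) (i : Nat) (k : Int), rs.drop i = l → k = i + roN rs i →
    (PySem.List.enumerate ((PySem.List.enumerate l (i : Int)).flatMap (rowSeg nr rs)) k).flatMap
        (fun pr => ((PySem.List.enumerate pr.2).filter (fun q => q.2 == '#')).map
          (fun q => (pr.1, q.1)))
      = (PySem.List.enumerate l (i : Int)).flatMap
          (fun pr => ((PySem.List.enumerate pr.2).filter (fun q => q.2 == '#')).map
            (fun q => (pr.1 + roN rs pr.1.toNat, q.1 + coN rs q.1.toNat))) := by
  intro l
  induction l with
  | nil => intro i k _ _; simp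
  | cons r l ih =>
    intro i k hdrop hk
    have hi : i < rs.length := by
      by_contra hlen
      rw [List.drop_eq_nil_iff.mpr (by omega)] at hdrop
      cases hdrop
    have hri : rs[i]? = some r := by
      have h0 : (rs.drop i)[0]? = some r := by rw [hdrop]; rfl
      rwa [List.getElem?_drop, Nat.add_zero] at h0
    have hmem : r ∈ rs := List.mem_of_getElem? hri
    have hdrop' : rs.drop (i + 1) = l := by
      have h1 := congrArg List.tail hdrop
      simpa [List.tail_drop] using h1
    have hgetD : rs.getD i [] = r := by
      simp [List.getD, hri]
    have hcast : (i : Int) + 1 = ((i + 1 : Nat) : Int) := by push_cast; ring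
    rw [PySem.List.enumerate_cons, List.flatMap_cons, PySem.List.enumerate_append,
      List.flatMap_append]
    by_cases h : rowNE r
    · have hseg : rowSeg nr rs ((i : Int), r) = [(PySem.List.enumerate r).flatMap (segC rs)] := by
        simp [rowSeg, h]
      have hsub : ∀ p ∈ PySem.List.enumerate r ((0 : Nat) : Int), p.2 = '#' → colNE rs p.1.toNat = true := by
        intro p hp hp2
        rw [PySem.List.mem_enumerate_iff] at hp
        obtain ⟨m, hm, rfl⟩ := hp
        have : rs.any (fun r' => r'.getD m '.' != '.') = true := by
          rw [List.any_eq_true]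
          refine ⟨r, hmem, ?_⟩
          rw [List.getD_eq_getElem r '.' hm]
          have hp2' : r[m] = '#' := hp2
          simp [hp2']
        unfold colNE
        simpa using this
      have hhash := hash_expRow rs r 0 0 hsub (by simp [coN])
      have htail := ih (i + 1) (k + 1) hdrop'
        (by rw [hk, roN_succ, hgetD, if_pos h]; push_cast; ring)
      rw [hseg]
      simp only [PySem.List.enumerate_cons, PySem.List.enumerate_nil, List.flatMap_cons,
        List.flatMap_nil, List.append_nil, List.length_cons, List.length_nil]
      rw [hcast, show k + ((0 : Nat) + 1 : Nat) = k + 1 from by push_cast; ring, htail]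
      congr 1
      have hmm : ((PySem.List.enumerate ((PySem.List.enumerate r ((0:Nat):Int)).flatMap (segC rs)) 0).filter
          (fun q => q.2 == '#')).map (fun q => (k, q.1))
          = (((PySem.List.enumerate ((PySem.List.enumerate r ((0:Nat):Int)).flatMap (segC rs)) 0).filter
          (fun q => q.2 == '#')).map (fun q => q.1)).map (fun j => (k, j)) := by
        rw [List.map_map]; rfl
      simp only [show ((0:Nat):Int) = (0:Int) from rfl] at hmm hhash
      rw [hmm, hhash, List.map_map]
      rw [hk]
      simp [Function.comp_def]
    · have hseg : rowSeg nr rs ((i : Int), r) = [nr, nr] := by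
        simp [rowSeg, h]
      have htail := ih (i + 1) (k + 2) hdrop'
        (by rw [hk, roN_succ, hgetD, if_neg (by simp [h])]; push_cast; ring)
      rw [hseg]
      simp only [PySem.List.enumerate_cons, PySem.List.enumerate_nil, List.flatMap_cons,
        List.flatMap_nil, List.append_nil, List.length_cons, List.length_nil]
      rw [hcast, show k + ((0 : Nat) + 1 + 1 : Nat) = k + 2 from by push_cast; ring, htail]
      rw [filter_hash_nil nr 0 hnr, filter_hash_nil r 0 (rowNE_false (by simpa using h))]
      simp

lemma mark_getElem?' {β : Type} (E : List β) (p : β → Prop) [DecidablePred p] (idx : β → Int) (v : Bool)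
    (bs : List Bool) (j : Nat) (hj : j < bs.length) (hidx : ∀ e ∈ E, 0 ≤ idx e) :
    (E.foldl (fun bs e => if p e then PySem.List.pySetD bs (idx e) v else bs) bs)[j]? =
      if E.any (fun e => decide (p e) && idx e == (j : Int)) then some v else bs[j]? := by
  induction E generalizing bs with
  | nil => simp
  | cons e E ih =>
    simp only [List.foldl_cons, List.any_cons]
    by_cases hp : p e
    · have h0 : (0:Int) ≤ idx e := hidx e (by simp)
      rw [if_pos hp, PySem.List.pySetD_of_nonneg bs v h0,
        ih _ (by simpa using hj) (fun e' he' => hidx e' (by simp [he']))]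
      by_cases hq : idx e = (j : Int)
      · have ht : (idx e).toNat = j := by omega
        have hbeq : (idx e == (j:Int)) = true := by simp [hq]
        simp [hp, hbeq, ht, hj]
      · have ht : (idx e).toNat ≠ j := by omega
        have hbeq : (idx e == (j:Int)) = false := by simp [hq]
        simp [hp, hbeq, ht]
    · rw [if_neg hp, ih bs hj (fun e' he' => hidx e' (by simp [he']))]
      simp [hp]

lemma prefixOffsets_fold (bs : List Bool) :
    ∀ (acc : List Int) (n : Int), bs.foldl (fun (st : List Int × Int) b =>
      (st.1 ++ [st.2], if !b then st.2 + 1 else st.2)) (acc, n)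
      = (acc ++ (List.range bs.length).map (fun i => n + ((bs.take i).countP (fun b => !b) : Int)),
         n + (bs.countP (fun b => !b) : Int)) := by
  induction bs with
  | nil => intro acc n; simp
  | cons b bs ih =>
    intro acc n
    simp only [List.foldl_cons]
    rw [ih]
    rw [Prod.mk.injEq]
    constructor
    · rw [List.length_cons, List.range_succ_eq_map, List.map_cons, List.map_map,
        List.append_assoc]
      congr 1
      rw [show ((n + ((List.countP (fun b => !b) (List.take 0 (b :: bs))) : Int)) ::
          List.map ((fun i => n + ((List.countP (fun b => !b) (List.take i (b :: bs))) : Int)) ∘ Nat.succ)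
            (List.range bs.length))
          = [n + ((List.countP (fun b => !b) (List.take 0 (b :: bs))) : Int)] ++
          List.map ((fun i => n + ((List.countP (fun b => !b) (List.take i (b :: bs))) : Int)) ∘ Nat.succ)
            (List.range bs.length) from rfl]
      congr 1
      · simp
      · apply List.map_congr_left
        intro i hi
        simp only [Function.comp_def, List.take_succ_cons, List.countP_cons]
        by_cases hb : b <;> simp [hb] <;> push_cast <;> ring
    · rw [List.countP_cons]
      by_cases hb : b <;> simp [hb] <;> push_cast <;> ring

lemma take_countP_eq (bs : List Bool) (P : Nat → Bool)
    (hbs : ∀ t, t < bs.length → bs.getD t false = P t) :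
    ∀ i, i ≤ bs.length →
      ((bs.take i).countP (fun b => !b) : Int) = ((List.range i).countP (fun t => !P t) : Int) := by
  intro i
  induction i with
  | zero => intro _; simp
  | succ i ih =>
    intro hi
    have hi' : i < bs.length := by omega
    rw [List.take_add_one, List.countP_append, List.range_succ, List.countP_append]
    rw [List.getElem?_eq_getElem hi']
    have hbi : bs[i] = P i := by
      have := hbs i hi'
      rwa [List.getD_eq_getElem bs false hi'] at this
    have h1 := ih (by omega)
    push_cast at h1 ⊢
    rw [h1, hbi]
    simp

lemma enumerate_map {α β : Type} (f : α → β) (l : List α) (s : Int) :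
    PySem.List.enumerate (l.map f) s = (PySem.List.enumerate l s).map (fun p => (p.1, f p.2)) := by
  induction l generalizing s with
  | nil => simp
  | cons a l ih => simp [PySem.List.enumerate_cons, ih]


lemma roN_mono (rs : List (List Char)) {i i' : Nat} (h : i ≤ i') : roN rs i ≤ roN rs i' := by
  unfold roN
  have := List.Sublist.countP_le (p := fun t => !rowNE (rs.getD t [])) (List.range_sublist.mpr h)
  omega

lemma coN_mono (rs : List (List Char)) {j j' : Nat} (h : j ≤ j') : coN rs j ≤ coN rs j' := by
  unfold coN
  have := List.Sublist.countP_le (p := fun t => !colNE rs t) (List.range_sublist.mpr h)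
  omega

lemma pairwise_flatMap_lex (L : List (Int × List Char)) (g : Int × List Char → List (Int × Int))
    (key : Int × List Char → Int)
    (hfst : ∀ pr, ∀ z ∈ g pr, z.1 = key pr)
    (hrow : ∀ pr, (g pr).Pairwise (fun a b => a.2 < b.2))
    (hL : L.Pairwise (fun p q => key p < key q)) :
    (L.flatMap g).Pairwise (fun a b => a.1 < b.1 ∨ (a.1 = b.1 ∧ a.2 < b.2)) := by
  induction L with
  | nil => simp
  | cons pr L ih =>
    rw [List.flatMap_cons, List.pairwise_append]
    obtain ⟨hhead, htail⟩ := List.pairwise_cons.mp hL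
    refine ⟨?_, ih htail, ?_⟩
    · refine (hrow pr).imp_of_mem ?_
      intro a b ha hb hab
      exact Or.inr ⟨by rw [hfst pr a ha, hfst pr b hb], hab⟩
    · intro a ha b hb
      rw [List.mem_flatMap] at hb
      obtain ⟨pr', hpr', hb⟩ := hb
      left
      rw [hfst pr a ha, hfst pr' b hb]
      exact hhead pr' hpr'

lemma gSpec_nodup (rs : List (List Char)) : (gSpec rs).Nodup := by
  have hpw : (gSpec rs).Pairwise (fun a b => a.1 < b.1 ∨ (a.1 = b.1 ∧ a.2 < b.2)) := by
    apply pairwise_flatMap_lex _ _ (fun pr => pr.1 + roN rs pr.1.toNat)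
    · intro pr z hz
      rw [List.mem_map] at hz
      obtain ⟨q, _, rfl⟩ := hz
      rfl
    · intro pr
      rw [List.pairwise_map]
      refine ((PySem.List.pairwise_lt_enumerate pr.2 0).filter _).imp_of_mem ?_
      intro a b ha hb hab
      have ha0 : 0 ≤ a.1 := by
        have := List.mem_of_mem_filter ha
        rw [PySem.List.mem_enumerate_iff] at this
        obtain ⟨k, _, rfl⟩ := this
        simp
      have hb0 : 0 ≤ b.1 := by
        have := List.mem_of_mem_filter hb
        rw [PySem.List.mem_enumerate_iff] at this
        obtain ⟨k, _, rfl⟩ := this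
        simp
      have hmono := coN_mono rs (show a.1.toNat ≤ b.1.toNat by omega)
      simp only []
      omega
    · refine (PySem.List.pairwise_lt_enumerate rs 0).imp_of_mem ?_
      intro a b ha hb hab
      have ha0 : 0 ≤ a.1 := by
        rw [PySem.List.mem_enumerate_iff] at ha
        obtain ⟨k, _, rfl⟩ := ha
        simp
      have hb0 : 0 ≤ b.1 := by
        rw [PySem.List.mem_enumerate_iff] at hb
        obtain ⟨k, _, rfl⟩ := hb
        simp
      have hmono := roN_mono rs (show a.1.toNat ≤ b.1.toNat by omega)
      omega
  refine hpw.imp ?_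
  intro a b hab
  rcases hab with h | ⟨h1, h2⟩
  · intro he; rw [he] at h; omega
  · intro he; rw [he] at h2; omega

def pairSum {α : Type} (f : α → α → Int) : List α → Int
  | [] => 0
  | x :: t => (t.map (f x)).sum + pairSum f t

def pairAbs (l : List Int) : Int := pairSum (fun a b => |b - a|) l

lemma inner_loop {α : Type} [BEq α] [LawfulBEq α] (f : α → α → Int) (x : α) (p : List α)
    (w : List α) (t : Int) (V : PySem.Set (α × α))
    (hV : ∀ y, ((y, x) ∈ V ↔ y ∈ p)) :
    (w.foldl (fun st y => if x == y || PySem.Set.contains st.2 (y, x) then st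
      else (st.1 + f x y, PySem.Set.add st.2 (x, y))) (t, V)).1
      = t + ((w.filter (fun y => !(x == y) && !(p.contains y))).map (f x)).sum
    ∧ ∀ z : α × α, z ∈ (w.foldl (fun st y => if x == y || PySem.Set.contains st.2 (y, x) then st
      else (st.1 + f x y, PySem.Set.add st.2 (x, y))) (t, V)).2 ↔
        z ∈ V ∨ (z.1 = x ∧ z.2 ∈ w ∧ z.2 ≠ x ∧ z.2 ∉ p) := by
  induction w generalizing t V with
  | nil => simp
  | cons y w ih =>
    simp only [List.foldl_cons, List.filter_cons]
    by_cases hxy : x = y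
    · subst hxy
      have hcond : (x == x || PySem.Set.contains V (x, x)) = true := by simp
      rw [hcond]
      simp only [if_true]
      obtain ⟨h1, h2⟩ := ih t V hV
      have hfil : (!(x == x) && !(p.contains x)) = false := by simp
      rw [hfil]
      refine ⟨by simpa using h1, ?_⟩
      rintro ⟨z1, z2⟩
      rw [h2 (z1, z2)]
      simp only []
      constructor
      · rintro (hz | ⟨rfl, hz2, hz3, hz4⟩)
        · exact Or.inl hz
        · exact Or.inr ⟨rfl, List.mem_cons_of_mem _ hz2, hz3, hz4⟩
      · rintro (hz | ⟨rfl, hz2, hz3, hz4⟩)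
        · exact Or.inl hz
        · rcases List.mem_cons.mp hz2 with rfl | h
          · exact absurd rfl hz3
          · exact Or.inr ⟨rfl, h, hz3, hz4⟩
    · by_cases hyp : y ∈ p
      · have hcond : (x == y || PySem.Set.contains V (y, x)) = true := by
          simp only [Bool.or_eq_true, PySem.Set.contains_iff]
          exact Or.inr ((hV y).mpr hyp)
        rw [hcond]
        simp only [if_true]
        obtain ⟨h1, h2⟩ := ih t V hV
        have hfil : (!(x == y) && !(p.contains y)) = false := by simp [hyp]
        rw [hfil]
        refine ⟨by simpa using h1, ?_⟩
        rintro ⟨z1, z2⟩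
        rw [h2 (z1, z2)]
        simp only []
        constructor
        · rintro (hz | ⟨rfl, hz2, hz3, hz4⟩)
          · exact Or.inl hz
          · exact Or.inr ⟨rfl, List.mem_cons_of_mem _ hz2, hz3, hz4⟩
        · rintro (hz | ⟨rfl, hz2, hz3, hz4⟩)
          · exact Or.inl hz
          · rcases List.mem_cons.mp hz2 with rfl | h
            · exact absurd hyp hz4
            · exact Or.inr ⟨rfl, h, hz3, hz4⟩
      · have hcond : (x == y || PySem.Set.contains V (y, x)) = false := by
          simp only [Bool.or_eq_false_iff]
          refine ⟨by simpa using hxy, ?_⟩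
          rw [Bool.eq_false_iff]
          intro hc
          rw [PySem.Set.contains_iff] at hc
          exact hyp ((hV y).mp hc)
        rw [hcond]
        simp only [Bool.false_eq_true, if_false]
        have hV' : ∀ y', ((y', x) ∈ PySem.Set.add V (x, y) ↔ y' ∈ p) := by
          intro y'
          rw [PySem.Set.mem_add]
          constructor
          · rintro (h | h)
            · exact (hV y').mp h
            · rw [Prod.mk.injEq] at h
              exact absurd h.2 hxy
          · intro h
            exact Or.inl ((hV y').mpr h)
        obtain ⟨h1, h2⟩ := ih (t + f x y) (PySem.Set.add V (x, y)) hV'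
        have hfil : (!(x == y) && !(p.contains y)) = true := by simp [hxy, hyp]
        rw [hfil]
        refine ⟨by rw [h1]; simp; ring, ?_⟩
        rintro ⟨z1, z2⟩
        rw [h2 (z1, z2), PySem.Set.mem_add]
        simp only []
        constructor
        · rintro ((hz | hz) | ⟨rfl, hz2, hz3, hz4⟩)
          · exact Or.inl hz
          · rw [Prod.mk.injEq] at hz
            obtain ⟨rfl, rfl⟩ := hz
            exact Or.inr ⟨rfl, List.mem_cons_self, fun hh => hxy hh.symm, hyp⟩
          · exact Or.inr ⟨rfl, List.mem_cons_of_mem _ hz2, hz3, hz4⟩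
        · rintro (hz | ⟨rfl, hz2, hz3, hz4⟩)
          · exact Or.inl (Or.inl hz)
          · rcases List.mem_cons.mp hz2 with rfl | h
            · exact Or.inl (Or.inr rfl)
            · exact Or.inr ⟨rfl, h, hz3, hz4⟩

lemma outer_loop {α : Type} [BEq α] [LawfulBEq α] (f : α → α → Int) (g : List α) (hg : g.Nodup) :
    ∀ (rest p : List α) (t : Int) (V : PySem.Set (α × α)), g = p ++ rest →
    (∀ x ∈ rest, ∀ y, ((y, x) ∈ V ↔ y ∈ p)) →
    (rest.foldl (fun st x => g.foldl (fun st y => if x == y || PySem.Set.contains st.2 (y, x) then st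
      else (st.1 + f x y, PySem.Set.add st.2 (x, y))) st) (t, V)).1 = t + pairSum f rest := by
  intro rest
  induction rest with
  | nil => intro p t V _ _; simp [pairSum]
  | cons x rest ih =>
    intro p t V hsplit hV
    simp only [List.foldl_cons]
    have hin := inner_loop f x p g t V (hV x (by simp))
    have hnd : (p ++ x :: rest).Nodup := hsplit ▸ hg
    have hxrest : x ∉ rest := by
      have := (List.Nodup.of_append_right hnd)
      exact (List.nodup_cons.mp this).1
    have hdisj : ∀ y ∈ x :: rest, y ∉ p := by
      intro y hy hyp
      exact (List.disjoint_of_nodup_append hnd) hyp hy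
    have hfilter : g.filter (fun y => !(x == y) && !(p.contains y)) = rest := by
      rw [hsplit, List.filter_append, List.filter_cons]
      have h1 : p.filter (fun y => !(x == y) && !(p.contains y)) = [] := by
        rw [List.filter_eq_nil_iff]
        intro y hy
        simp [hy]
      have h2 : (!(x == x) && !(p.contains x)) = false := by simp
      have h3 : rest.filter (fun y => !(x == y) && !(p.contains y)) = rest := by
        rw [List.filter_eq_self]
        intro y hy
        have hxy : ¬(x == y) = true := by
          simp only [beq_iff_eq]
          rintro rfl
          exact hxrest hy
        have hyp : y ∉ p := hdisj y (List.mem_cons_of_mem _ hy)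
        simp [hxy, hyp]
      rw [h1, h2, h3]
      simp
    set st1 := g.foldl (fun st y => if x == y || PySem.Set.contains st.2 (y, x) then st
      else (st.1 + f x y, PySem.Set.add st.2 (x, y))) (t, V) with hst1
    have heta : st1 = (st1.1, st1.2) := rfl
    rw [heta]
    have hV' : ∀ x' ∈ rest, ∀ y, ((y, x') ∈ st1.2 ↔ y ∈ p ++ [x]) := by
      intro x' hx' y
      rw [hin.2 (y, x'), List.mem_append, List.mem_singleton]
      have hx'g : x' ∈ g := by
        rw [hsplit]
        exact List.mem_append_right _ (List.mem_cons_of_mem _ hx')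
      have hx'x : x' ≠ x := fun hh => hxrest (hh ▸ hx')
      have hx'p : x' ∉ p := hdisj x' (List.mem_cons_of_mem _ hx')
      rw [hV x' (List.mem_cons_of_mem _ hx') y]
      constructor
      · rintro (h | ⟨h1, _, _, _⟩)
        · exact Or.inl h
        · exact Or.inr h1
      · rintro (h | rfl)
        · exact Or.inl h
        · exact Or.inr ⟨rfl, hx'g, hx'x, hx'p⟩
    rw [ih (p ++ [x]) st1.1 st1.2 (by rw [hsplit]; simp) hV']
    rw [hin.1, hfilter]
    simp only [pairSum]
    ring

lemma pair_loop {α : Type} [BEq α] [LawfulBEq α] (f : α → α → Int) (g : List α) (hg : g.Nodup) :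
    (g.foldl (fun st x => g.foldl (fun st y => if x == y || PySem.Set.contains st.2 (y, x) then st
      else (st.1 + f x y, PySem.Set.add st.2 (x, y))) st) ((0 : Int), PySem.Set.empty)).1
      = pairSum f g := by
  simpa using outer_loop f g hg g [] 0 PySem.Set.empty rfl (by simp [PySem.Set.empty])

lemma sum_map_add {α : Type} (l : List α) (f g : α → Int) :
    (l.map (fun y => f y + g y)).sum = (l.map f).sum + (l.map g).sum := by
  induction l with
  | nil => simp
  | cons a l ih => simp [ih]; ring

lemma pairSum_split (g : List (Int × Int)) :
    pairSum (fun a b => |b.1 - a.1| + |b.2 - a.2|) g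
      = pairAbs (g.map Prod.fst) + pairAbs (g.map Prod.snd) := by
  induction g with
  | nil => simp [pairAbs, pairSum]
  | cons x t ih =>
    simp only [pairAbs, pairSum, List.map_cons, List.map_map] at *
    rw [ih, sum_map_add t (fun y => |y.1 - x.1|) (fun y => |y.2 - x.2|)]
    simp only [Function.comp_def]
    ring

lemma pairAbs_perm {l l' : List Int} (h : l.Perm l') : pairAbs l = pairAbs l' := by
  induction h with
  | nil => rfl
  | cons x h ih =>
    simp only [pairAbs, pairSum] at *
    rw [ih, (h.map (fun b => |b - x|)).sum_eq]
  | swap x y l =>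
    simp only [pairAbs, pairSum, List.map_cons, List.sum_cons]
    rw [abs_sub_comm x y]
    ring
  | trans _ _ ih1 ih2 => exact ih1.trans ih2

lemma pairAbs_append (l : List Int) (x : Int) :
    pairAbs (l ++ [x]) = pairAbs l + (l.map (fun a => |x - a|)).sum := by
  induction l with
  | nil => simp [pairAbs, pairSum]
  | cons a l ih =>
    simp only [pairAbs, pairSum, List.cons_append, List.map_append, List.sum_append,
      List.map_cons, List.sum_cons, List.map_nil, List.sum_nil] at *
    rw [ih]
    ring

lemma sum_map_const_sub (x : Int) (l : List Int) (h : ∀ a ∈ l, a ≤ x) :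
    (l.map (fun a => |x - a|)).sum = l.length * x - l.sum := by
  induction l with
  | nil => simp
  | cons a l ih =>
    have ha : |x - a| = x - a := abs_of_nonneg (by have := h a (by simp); omega)
    rw [List.map_cons, List.sum_cons, ha, ih (fun b hb => h b (by simp [hb]))]
    simp only [List.length_cons, List.sum_cons]
    push_cast
    ring

lemma spread_spec (l : List Int) (h : l.Pairwise (· ≤ ·)) :
    (PySem.List.enumerate l).foldl (fun (st : Int × Int) p =>
      (st.1 + p.1 * p.2 - st.2, st.2 + p.2)) ((0 : Int), (0 : Int)) = (pairAbs l, l.sum) := by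
  induction l using List.reverseRecOn with
  | nil => simp [pairAbs, pairSum]
  | append_singleton l x ih =>
    have hsplit := List.pairwise_append.mp h
    have hl : l.Pairwise (· ≤ ·) := hsplit.1
    have hle : ∀ a ∈ l, a ≤ x := fun a ha => hsplit.2.2 a ha x (by simp)
    rw [PySem.List.enumerate_append, List.foldl_append, ih hl]
    simp only [PySem.List.enumerate_cons, PySem.List.enumerate_nil, List.foldl_cons, List.foldl_nil]
    rw [pairAbs_append, sum_map_const_sub x l hle, Prod.mk.injEq]
    constructor
    · push_cast
      ring
    · simp


lemma markFold_fst_getElem? (rs : List (List Char)) (v : Bool) (bs0 cs0 : List Bool)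
    (hb : bs0.length = rs.length) (i : Nat) (hi : i < rs.length) :
    (markFold rs v bs0 cs0).1[i]? = if rowNE (rs.getD i []) then some v else bs0[i]? := by
  rw [markFold_eq]
  dsimp only
  rw [mark_getElem?' (events rs) (fun e => e.2.2 ≠ '.') (fun e => e.1) v bs0 i (by omega)
    (fun e he => (mem_events he).1)]
  have hpred : ((events rs).any (fun e => decide (e.2.2 ≠ '.') && e.1 == (i : Int)))
      = ((events rs).any (fun e => (e.2.2 != '.') && e.1 == (i : Int))) := by
    apply congrArg
    funext e
    rw [Bool.eq_iff_iff]
    simp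
  rw [hpred, any_events_row rs i hi]

lemma markFold_snd_getElem? (rs : List (List Char)) (v : Bool) (bs0 cs0 : List Bool)
    (j : Nat) (hj : j < cs0.length) :
    (markFold rs v bs0 cs0).2[j]? = if colNE rs j then some v else cs0[j]? := by
  rw [markFold_eq]
  dsimp only
  rw [mark_getElem?' (events rs) (fun e => e.2.2 ≠ '.') (fun e => e.2.1) v cs0 j hj
    (fun e he => (mem_events he).2)]
  have hpred : ((events rs).any (fun e => decide (e.2.2 ≠ '.') && e.2.1 == (j : Int)))
      = ((events rs).any (fun e => (e.2.2 != '.') && e.2.1 == (j : Int))) := by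
    apply congrArg
    funext e
    rw [Bool.eq_iff_iff]
    simp
  rw [hpred, any_events_col rs j]

lemma findGalaxies_eq (L : List (List Char)) :
    findGalaxies L = (PySem.List.enumerate L).flatMap (fun pr =>
      ((PySem.List.enumerate pr.2).filter (fun q => q.2 == '#')).map (fun q => (pr.1, q.1))) := by
  unfold findGalaxies
  have hstep : ∀ (acc : List (Int × Int)), ∀ pr ∈ PySem.List.enumerate L,
      (PySem.List.enumerate pr.2).foldl
          (fun acc (qr : Int × Char) => if qr.2 = '#' then acc ++ [(pr.1, qr.1)] else acc) acc
        = acc ++ ((PySem.List.enumerate pr.2).filter (fun q => q.2 == '#')).map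
            (fun q => (pr.1, q.1)) := by
    intro acc pr _
    rw [PySem.List.foldl_append_ite (fun (qr : Int × Char) => qr.2 = '#') (fun q => (pr.1, q.1))]
    congr 2
  rw [PySem.List.foldl_congr_mem _ _ _ _ hstep, PySem.List.foldl_append_eq_flatMap]
  simp

lemma mark_length' {β : Type} (E : List β) (p : β → Prop) [DecidablePred p] (idx : β → Int)
    (v : Bool) (bs : List Bool) :
    (E.foldl (fun bs e => if p e then PySem.List.pySetD bs (idx e) v else bs) bs).length
      = bs.length := by
  induction E generalizing bs with
  | nil => rfl
  | cons e E ih =>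
    simp only [List.foldl_cons]
    split <;> simp [ih, PySem.List.length_pySetD]

lemma markFold_lengths (rs : List (List Char)) (v : Bool) (bs0 cs0 : List Bool) :
    (markFold rs v bs0 cs0).1.length = bs0.length ∧ (markFold rs v bs0 cs0).2.length = cs0.length := by
  rw [markFold_eq]
  exact ⟨mark_length' _ _ _ _ _, mark_length' _ _ _ _ _⟩

-- named pieces of port A's expandEmptySpace (definitionally equal to the port's lets)
def mfA (rs : List (List Char)) : List Bool × List Bool :=
  markFold rs false (List.replicate rs.length true)
    (List.replicate (PySem.List.pyGetD rs 0 []).length true)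

def ecolsA (rs : List (List Char)) : List (List Char) :=
  (PySem.List.enumerate rs).foldl (fun acc pr =>
    acc ++ [(PySem.List.enumerate pr.2).foldl (fun nc qr =>
      nc ++ (if PySem.List.pyGetD (mfA rs).2 qr.1 true then ['.', '.'] else [qr.2])) []]) []

def nrA (rs : List (List Char)) : List Char :=
  List.replicate (PySem.List.pyGetD (ecolsA rs) 0 []).length '.'

lemma expandEmptySpace_eq (rs : List (List Char)) :
    expandEmptySpace rs = (PySem.List.enumerate (ecolsA rs)).foldl (fun acc pr =>
      if PySem.List.pyGetD (mfA rs).1 pr.1 true then (acc ++ [nrA rs]) ++ [nrA rs]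
      else acc ++ [pr.2]) [] := rfl

lemma mfA_snd_getD (rs : List (List Char)) (m : Nat)
    (hm : m < (PySem.List.pyGetD rs 0 []).length) :
    PySem.List.pyGetD (mfA rs).2 (m : Int) true = !colNE rs m := by
  rw [PySem.List.pyGetD_natCast]
  unfold mfA
  rw [List.getD, markFold_snd_getElem? rs false _ _ m (by simpa using hm)]
  by_cases h : colNE rs m <;> simp [h, List.getElem?_replicate, hm]

lemma mfA_fst_getD (rs : List (List Char)) (i : Nat) (hi : i < rs.length) :
    PySem.List.pyGetD (mfA rs).1 (i : Int) true = !rowNE (rs.getD i []) := by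
  rw [PySem.List.pyGetD_natCast]
  unfold mfA
  rw [List.getD, markFold_fst_getElem? rs false _ _ (by simp) i hi,
    List.getD_eq_getElem rs [] hi]
  by_cases h : rowNE rs[i] <;> simp [h]

lemma ecolsA_eq (rs : List (List Char))
    (hlen : ∀ r ∈ rs, r.length ≤ (PySem.List.pyGetD rs 0 []).length) :
    ecolsA rs = rs.map (fun r => (PySem.List.enumerate r).flatMap (segC rs)) := by
  unfold ecolsA
  rw [PySem.List.foldl_append_singleton_eq_map]
  rw [show (fun (pr : Int × List Char) => (PySem.List.enumerate pr.2).foldl (fun nc qr =>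
      nc ++ (if PySem.List.pyGetD (mfA rs).2 qr.1 true then ['.', '.'] else [qr.2])) [])
    = (fun r => (PySem.List.enumerate r).foldl (fun nc qr =>
      nc ++ (if PySem.List.pyGetD (mfA rs).2 qr.1 true then ['.', '.'] else [qr.2])) []) ∘ Prod.snd
    from rfl]
  rw [← List.map_map, PySem.List.map_snd_enumerate]
  simp only [List.nil_append]
  apply List.map_congr_left
  intro r hr
  rw [PySem.List.foldl_append_eq_flatMap]
  simp only [List.nil_append]
  refine List.flatMap_congr ?_
  intro qr hqr
  rw [PySem.List.mem_enumerate_iff] at hqr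
  obtain ⟨m, hm, rfl⟩ := hqr
  have hmW : m < (PySem.List.pyGetD rs 0 []).length := lt_of_lt_of_le hm (hlen r hr)
  rw [show (0 : Int) + (m : Int) = ((m : Nat) : Int) from by simp]
  rw [mfA_snd_getD rs m hmW]
  unfold segC
  by_cases h : colNE rs m <;> simp [h]

lemma nrA_dots (rs : List (List Char)) : ∀ c ∈ nrA rs, c = '.' := by
  intro c hc
  exact List.eq_of_mem_replicate hc

lemma erowsA_eq (rs : List (List Char))
    (hlen : ∀ r ∈ rs, r.length ≤ (PySem.List.pyGetD rs 0 []).length) :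
    expandEmptySpace rs = (PySem.List.enumerate rs).flatMap (rowSeg (nrA rs) rs) := by
  rw [expandEmptySpace_eq]
  have hstep : ∀ (acc : List (List Char)), ∀ pr ∈ PySem.List.enumerate (ecolsA rs),
      (if PySem.List.pyGetD (mfA rs).1 pr.1 true then (acc ++ [nrA rs]) ++ [nrA rs]
        else acc ++ [pr.2])
      = acc ++ (if PySem.List.pyGetD (mfA rs).1 pr.1 true then [nrA rs, nrA rs] else [pr.2]) := by
    intro acc pr _
    split_ifs <;> simp
  rw [PySem.List.foldl_congr_mem _ _ _ _ hstep, PySem.List.foldl_append_eq_flatMap]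
  simp only [List.nil_append]
  rw [ecolsA_eq rs hlen, enumerate_map]
  rw [List.flatMap_map]
  refine List.flatMap_congr ?_
  intro pr hpr
  rw [PySem.List.mem_enumerate_iff] at hpr
  obtain ⟨i, hi, rfl⟩ := hpr
  rw [show (0 : Int) + (i : Int) = ((i : Nat) : Int) from by simp]
  rw [mfA_fst_getD rs i hi]
  have hgd : rs.getD i [] = rs[i] := List.getD_eq_getElem rs [] hi
  unfold rowSeg
  rw [hgd]
  by_cases h : rowNE rs[i] <;> simp [h]

lemma A_galaxies (rs : List (List Char))
    (hlen : ∀ r ∈ rs, r.length ≤ (PySem.List.pyGetD rs 0 []).length) :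
    findGalaxies (expandEmptySpace rs) = gSpec rs := by
  rw [erowsA_eq rs hlen, findGalaxies_eq]
  have := gal_rows rs (nrA rs) (nrA_dots rs) rs 0 0 (by simp) (by simp [roN])
  simpa [gSpec] using this

lemma A_value (rows : List String)
    (hlen : ∀ r ∈ rows.map String.toList,
      r.length ≤ (PySem.List.pyGetD (rows.map String.toList) 0 []).length) :
    sum_of_shortest_paths rows
      = pairAbs ((gSpec (rows.map String.toList)).map Prod.fst)
        + pairAbs ((gSpec (rows.map String.toList)).map Prod.snd) := by
  have hA : sum_of_shortest_paths rows
      = ((findGalaxies (expandEmptySpace (rows.map String.toList))).foldl (fun st x =>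
          (findGalaxies (expandEmptySpace (rows.map String.toList))).foldl (fun st y =>
            if x == y || PySem.Set.contains st.2 (y, x) then st
            else (st.1 + getShortestPath x y, PySem.Set.add st.2 (x, y))) st)
          ((0 : Int), PySem.Set.empty)).1 := rfl
  rw [hA, A_galaxies _ hlen, pair_loop getShortestPath _ (gSpec_nodup _)]
  have hf : pairSum getShortestPath (gSpec (rows.map String.toList))
      = pairSum (fun a b => |b.1 - a.1| + |b.2 - a.2|) (gSpec (rows.map String.toList)) := rfl
  rw [hf, pairSum_split]

-- named pieces of port B (definitionally the port's lets)
def neB (rs : List (List Char)) : List Bool × List Bool :=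
  markFold rs true (List.replicate rs.length false)
    (List.replicate (PySem.List.pyGetD rs 0 []).length false)

def xyB (rs : List (List Char)) : List Int × List Int :=
  (PySem.List.enumerate rs).foldl (fun (st : List Int × List Int) pr =>
    (PySem.List.enumerate pr.2).foldl (fun st qr =>
      if qr.2 = '#' then
        (st.1 ++ [pr.1 + PySem.List.pyGetD (prefixOffsets (neB rs).1) pr.1 0],
         st.2 ++ [qr.1 + PySem.List.pyGetD (prefixOffsets (neB rs).2) qr.1 0])
      else st) st) (([] : List Int), ([] : List Int))

lemma alt_eq (rows : List String) :
    sum_of_shortest_paths_alt rows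
      = spread (PySem.List.sorted (xyB (rows.map String.toList)).1 (fun x => x) false)
        + spread (PySem.List.sorted (xyB (rows.map String.toList)).2 (fun x => x) false) := rfl

lemma neB_fst_getD (rs : List (List Char)) (t : Nat) (ht : t < rs.length) :
    (neB rs).1.getD t false = rowNE (rs.getD t []) := by
  unfold neB
  rw [List.getD, markFold_fst_getElem? rs true _ _ (by simp) t ht,
    List.getD_eq_getElem rs [] ht]
  by_cases h : rowNE rs[t] <;> simp [h]

lemma neB_snd_getD (rs : List (List Char)) (t : Nat)
    (ht : t < (PySem.List.pyGetD rs 0 []).length) :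
    (neB rs).2.getD t false = colNE rs t := by
  unfold neB
  rw [List.getD, markFold_snd_getElem? rs true _ _ t (by simpa using ht)]
  by_cases h : colNE rs t <;> simp [h, ht]

lemma neB_fst_length (rs : List (List Char)) : (neB rs).1.length = rs.length := by
  unfold neB
  rw [(markFold_lengths rs true _ _).1, List.length_replicate]

lemma neB_snd_length (rs : List (List Char)) :
    (neB rs).2.length = (PySem.List.pyGetD rs 0 []).length := by
  unfold neB
  rw [(markFold_lengths rs true _ _).2, List.length_replicate]

lemma offsets_getD (bs : List Bool) (P : Nat → Bool)
    (hbs : ∀ t, t < bs.length → bs.getD t false = P t) (i : Nat) (hi : i < bs.length) :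
    PySem.List.pyGetD (prefixOffsets bs) (i : Int) 0 = ((List.range i).countP (fun t => !P t) : Int) := by
  rw [PySem.List.pyGetD_natCast]
  unfold prefixOffsets
  rw [prefixOffsets_fold]
  dsimp only
  rw [List.nil_append, List.getD_eq_getElem _ 0 (by simpa using hi), List.getElem_map,
    List.getElem_range]
  rw [take_countP_eq bs P hbs i (by omega)]
  ring

lemma rowOff_getD (rs : List (List Char)) (i : Nat) (hi : i < rs.length) :
    PySem.List.pyGetD (prefixOffsets (neB rs).1) (i : Int) 0 = roN rs i := by
  rw [offsets_getD (neB rs).1 (fun t => rowNE (rs.getD t []))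
    (fun t ht => neB_fst_getD rs t (by rwa [neB_fst_length] at ht)) i
    (by rwa [neB_fst_length])]
  rfl

lemma colOff_getD (rs : List (List Char)) (j : Nat)
    (hj : j < (PySem.List.pyGetD rs 0 []).length) :
    PySem.List.pyGetD (prefixOffsets (neB rs).2) (j : Int) 0 = coN rs j := by
  rw [offsets_getD (neB rs).2 (fun t => colNE rs t)
    (fun t ht => neB_snd_getD rs t (by rwa [neB_snd_length] at ht)) j
    (by rwa [neB_snd_length])]
  rfl

lemma xyB_eq (rs : List (List Char))
    (hlen : ∀ r ∈ rs, r.length ≤ (PySem.List.pyGetD rs 0 []).length) :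
    (xyB rs).1 = (gSpec rs).map Prod.fst ∧ (xyB rs).2 = (gSpec rs).map Prod.snd := by
  have hsplit : xyB rs =
      ((PySem.List.enumerate rs).foldl (fun xs pr =>
        (PySem.List.enumerate pr.2).foldl (fun xs (qr : Int × Char) =>
          if qr.2 = '#' then xs ++ [pr.1 + PySem.List.pyGetD (prefixOffsets (neB rs).1) pr.1 0]
          else xs) xs) [],
       (PySem.List.enumerate rs).foldl (fun ys pr =>
        (PySem.List.enumerate pr.2).foldl (fun ys (qr : Int × Char) =>
          if qr.2 = '#' then ys ++ [qr.1 + PySem.List.pyGetD (prefixOffsets (neB rs).2) qr.1 0]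
          else ys) ys) []) := by
    unfold xyB
    have hstep : (fun (st : List Int × List Int) (pr : Int × List Char) =>
        (PySem.List.enumerate pr.2).foldl (fun st qr =>
          if qr.2 = '#' then
            (st.1 ++ [pr.1 + PySem.List.pyGetD (prefixOffsets (neB rs).1) pr.1 0],
             st.2 ++ [qr.1 + PySem.List.pyGetD (prefixOffsets (neB rs).2) qr.1 0])
          else st) st)
        = (fun (st : List Int × List Int) (pr : Int × List Char) =>
          ((PySem.List.enumerate pr.2).foldl (fun xs (qr : Int × Char) =>
              if qr.2 = '#' then xs ++ [pr.1 + PySem.List.pyGetD (prefixOffsets (neB rs).1) pr.1 0]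
              else xs) st.1,
           (PySem.List.enumerate pr.2).foldl (fun ys (qr : Int × Char) =>
              if qr.2 = '#' then ys ++ [qr.1 + PySem.List.pyGetD (prefixOffsets (neB rs).2) qr.1 0]
              else ys) st.2)) := by
      funext st pr
      obtain ⟨a, b⟩ := st
      have h2 : (fun (st : List Int × List Int) (qr : Int × Char) =>
          if qr.2 = '#' then
            (st.1 ++ [pr.1 + PySem.List.pyGetD (prefixOffsets (neB rs).1) pr.1 0],
             st.2 ++ [qr.1 + PySem.List.pyGetD (prefixOffsets (neB rs).2) qr.1 0])
          else st)
          = (fun (st : List Int × List Int) (qr : Int × Char) =>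
            (if qr.2 = '#' then st.1 ++ [pr.1 + PySem.List.pyGetD (prefixOffsets (neB rs).1) pr.1 0]
             else st.1,
             if qr.2 = '#' then st.2 ++ [qr.1 + PySem.List.pyGetD (prefixOffsets (neB rs).2) qr.1 0]
             else st.2)) := by
        funext st qr
        by_cases h : qr.2 = '#' <;> simp [h]
      rw [h2]
      exact PySem.List.foldl_prod_mk
        (fun xs (qr : Int × Char) =>
          if qr.2 = '#' then xs ++ [pr.1 + PySem.List.pyGetD (prefixOffsets (neB rs).1) pr.1 0] else xs)
        (fun ys (qr : Int × Char) =>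
          if qr.2 = '#' then ys ++ [qr.1 + PySem.List.pyGetD (prefixOffsets (neB rs).2) qr.1 0] else ys)
        (PySem.List.enumerate pr.2) a b
    rw [hstep]
    exact PySem.List.foldl_prod_mk
      (fun xs (pr : Int × List Char) => (PySem.List.enumerate pr.2).foldl
        (fun xs (qr : Int × Char) =>
          if qr.2 = '#' then xs ++ [pr.1 + PySem.List.pyGetD (prefixOffsets (neB rs).1) pr.1 0] else xs) xs)
      (fun ys (pr : Int × List Char) => (PySem.List.enumerate pr.2).foldl
        (fun ys (qr : Int × Char) =>
          if qr.2 = '#' then ys ++ [qr.1 + PySem.List.pyGetD (prefixOffsets (neB rs).2) qr.1 0] else ys) ys)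
      (PySem.List.enumerate rs) [] []
  constructor
  · rw [hsplit]
    dsimp only
    have hstep : ∀ (xs : List Int), ∀ pr ∈ PySem.List.enumerate rs,
        (PySem.List.enumerate pr.2).foldl (fun xs (qr : Int × Char) =>
          if qr.2 = '#' then xs ++ [pr.1 + PySem.List.pyGetD (prefixOffsets (neB rs).1) pr.1 0]
          else xs) xs
        = xs ++ ((PySem.List.enumerate pr.2).filter (fun q => q.2 == '#')).map
            (fun _ => pr.1 + PySem.List.pyGetD (prefixOffsets (neB rs).1) pr.1 0) := by
      intro xs pr _
      rw [PySem.List.foldl_append_ite (fun (qr : Int × Char) => qr.2 = '#')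
        (fun _ => pr.1 + PySem.List.pyGetD (prefixOffsets (neB rs).1) pr.1 0)]
      congr 2
    rw [PySem.List.foldl_congr_mem _ _ _ _ hstep, PySem.List.foldl_append_eq_flatMap]
    rw [List.nil_append, gSpec, List.map_flatMap]
    refine List.flatMap_congr ?_
    intro pr hpr
    rw [PySem.List.mem_enumerate_iff] at hpr
    obtain ⟨i, hi, rfl⟩ := hpr
    rw [List.map_map]
    apply List.map_congr_left
    intro q hq
    rw [show (0 : Int) + (i : Int) = ((i : Nat) : Int) from by simp]
    rw [rowOff_getD rs i hi]
    simp
  · rw [hsplit]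
    dsimp only
    have hstep : ∀ (ys : List Int), ∀ pr ∈ PySem.List.enumerate rs,
        (PySem.List.enumerate pr.2).foldl (fun ys (qr : Int × Char) =>
          if qr.2 = '#' then ys ++ [qr.1 + PySem.List.pyGetD (prefixOffsets (neB rs).2) qr.1 0]
          else ys) ys
        = ys ++ ((PySem.List.enumerate pr.2).filter (fun q => q.2 == '#')).map
            (fun qr => qr.1 + PySem.List.pyGetD (prefixOffsets (neB rs).2) qr.1 0) := by
      intro ys pr _
      rw [PySem.List.foldl_append_ite (fun (qr : Int × Char) => qr.2 = '#')
        (fun qr => qr.1 + PySem.List.pyGetD (prefixOffsets (neB rs).2) qr.1 0)]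
      congr 2
    rw [PySem.List.foldl_congr_mem _ _ _ _ hstep, PySem.List.foldl_append_eq_flatMap]
    rw [List.nil_append, gSpec, List.map_flatMap]
    refine List.flatMap_congr ?_
    intro pr hpr
    rw [PySem.List.mem_enumerate_iff] at hpr
    obtain ⟨i, hi, rfl⟩ := hpr
    rw [List.map_map]
    apply List.map_congr_left
    intro q hq
    have hq2 := List.mem_of_mem_filter hq
    rw [PySem.List.mem_enumerate_iff] at hq2
    obtain ⟨m, hm, rfl⟩ := hq2
    have hmW : m < (PySem.List.pyGetD rs 0 []).length :=
      lt_of_lt_of_le hm (hlen rs[i] (List.getElem_mem hi))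
    rw [show (0 : Int) + (m : Int) = ((m : Nat) : Int) from by simp]
    rw [colOff_getD rs m hmW]
    simp

lemma spread_sorted_eq (l : List Int) :
    spread (PySem.List.sorted l (fun x => x) false) = pairAbs l := by
  have hpw : (PySem.List.sorted l (fun x => x) false).Pairwise (· ≤ ·) := by
    simpa using PySem.List.sorted_pairwise l (fun x => x)
  have h1 : spread (PySem.List.sorted l (fun x => x) false)
      = pairAbs (PySem.List.sorted l (fun x => x) false) := by
    unfold spread
    rw [spread_spec _ hpw]
  rw [h1, pairAbs_perm (PySem.List.sorted_perm l (fun x => x) false)]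

lemma B_value (rows : List String)
    (hlen : ∀ r ∈ rows.map String.toList,
      r.length ≤ (PySem.List.pyGetD (rows.map String.toList) 0 []).length) :
    sum_of_shortest_paths_alt rows
      = pairAbs ((gSpec (rows.map String.toList)).map Prod.fst)
        + pairAbs ((gSpec (rows.map String.toList)).map Prod.snd) := by
  rw [alt_eq, (xyB_eq _ hlen).1, (xyB_eq _ hlen).2, spread_sorted_eq, spread_sorted_eq]

-- ===== VERDICT (by name: the statement is the Claim_ definition above) =====
theorem sum_of_shortest_paths_spec : Claim_equal_sum_of_shortest_paths := by
  intro rows _ hpre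
  unfold Spec_sum_of_shortest_paths
  obtain ⟨hne, hl⟩ := hpre
  obtain ⟨w, rows', rfl⟩ : ∃ w rows', rows = w :: rows' := by
    cases rows with
    | nil => exact absurd rfl hne
    | cons a l => exact ⟨a, l, rfl⟩
  have hW : PySem.List.pyGetD ((w :: rows').map String.toList) 0 [] = w.toList := by
    rw [show (0 : Int) = ((0 : Nat) : Int) from rfl, PySem.List.pyGetD_natCast]
    simp
  have hlen : ∀ r ∈ (w :: rows').map String.toList,
      r.length ≤ (PySem.List.pyGetD ((w :: rows').map String.toList) 0 []).length := by
    intro r hr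
    rw [hW]
    rw [List.mem_map] at hr
    obtain ⟨r0, hr0, rfl⟩ := hr
    simpa using hl r0 hr0
  rw [A_value _ hlen, B_value _ hlen]
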